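-- pv_equiv track=rewrite | github.com/mynotes4/Programming_Assingment25 | q5.py | ascii_capitalize
-- ===== SOURCE A (Python) =====
-- def ascii_capitalize(s):
--     s1 = ""
--     for i in s:
--         if ord(i) % 2 == 0:
--             s1 = s1 + i.upper()
--         else:
--             s1 = s1 + i.lower()
--     return s1
-- ===== SOURCE B (Python) =====
-- def ascii_capitalize(s):
--     table = {ord(c): (c.upper() if ord(c) % 2 == 0 else c.lower()) for c in set(s)}
--     return s.translate(table)
-- ===== Notes on version B (the rewrite author's own statement) =====
-- stated objective: faster
-- what changed: Builds a codepoint->cased-string translation table over the distinct characters once and does a single s.translate pass, instead of a char-by-char Python loop with repeated string concatenation.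
import Mathlib
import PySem

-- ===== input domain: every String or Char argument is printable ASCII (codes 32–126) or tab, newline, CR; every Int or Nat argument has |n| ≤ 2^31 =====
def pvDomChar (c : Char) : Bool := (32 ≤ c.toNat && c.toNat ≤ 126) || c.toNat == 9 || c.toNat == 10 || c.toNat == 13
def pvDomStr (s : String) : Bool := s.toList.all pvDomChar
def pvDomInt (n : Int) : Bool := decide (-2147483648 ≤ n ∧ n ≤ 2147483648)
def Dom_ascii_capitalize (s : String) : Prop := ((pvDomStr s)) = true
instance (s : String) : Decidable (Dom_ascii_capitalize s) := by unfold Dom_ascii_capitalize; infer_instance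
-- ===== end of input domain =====

-- B builds a codepoint→cased-string translation table over the distinct characters once,
-- then performs one translate pass, instead of A's per-char loop with string concatenation.

-- ===== PORT A =====
-- A: explicit loop, s1 = s1 + i.upper() / i.lower() per character.
def ascii_capitalize (s : String) : String :=
  s.toList.foldl
    (fun s1 i =>
      if (i.toNat : Int) % 2 == 0 then s1 ++ PySem.Str.upper (String.ofList [i])
      else s1 ++ PySem.Str.lower (String.ofList [i]))
    ""

-- ===== PORT B =====
-- the cased form of one character (the dict-comprehension's value expression)
def pvCase (c : Char) : String :=
  if (c.toNat : Int) % 2 == 0 then PySem.Str.upper (String.ofList [c])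
  else PySem.Str.lower (String.ofList [c])

-- table = {ord(c): (c.upper() if ord(c) % 2 == 0 else c.lower()) for c in set(s)}
def pvTable (s : String) : PySem.Dict Int String :=
  (PySem.Set.ofList s.toList).foldl
    (fun d c => d.insert (c.toNat : Int) (pvCase c)) PySem.Dict.empty

-- s.translate(table): each char is replaced by its table entry (kept as-is when absent)
def ascii_capitalize_alt (s : String) : String :=
  String.join (s.toList.map (fun c => (pvTable s).getD (c.toNat : Int) (String.ofList [c])))

-- ===== PRECONDITION & SPEC =====
def Spec_ascii_capitalize (s : String) (out : String) : Prop := out = ascii_capitalize_alt s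
instance (s : String) (out : String) : Decidable (Spec_ascii_capitalize s out) := by unfold Spec_ascii_capitalize; infer_instance

-- ===== CLAIM (what is proved, stated in full; the proofs are below) =====
def Claim_equal_ascii_capitalize : Prop := ∀ (s : String), Dom_ascii_capitalize s → Spec_ascii_capitalize s (ascii_capitalize s)

-- ===== LEMMAS AND PROOFS =====

-- keys other than (c.toNat) never disturb the entry at (c.toNat)
theorem pvTable_lookup_aux (l : List Char) (d : PySem.Dict Int String) (k : Int)
    (h : ∀ c ∈ l, ((c.toNat : Int)) ≠ k) :
    (l.foldl (fun d c => d.insert (c.toNat : Int) (pvCase c)) d).get? k = d.get? k := by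
  induction l generalizing d with
  | nil => rfl
  | cons a l ih =>
    simp only [List.foldl_cons]
    rw [ih _ (fun c hc => h c (List.mem_cons_of_mem _ hc))]
    exact PySem.Dict.get?_insert_of_ne _ _ (h a (List.mem_cons_self)).symm

theorem pvTable_lookup (l : List Char) (d : PySem.Dict Int String) (c : Char) (hc : c ∈ l) :
    (l.foldl (fun d c => d.insert (c.toNat : Int) (pvCase c)) d).get? (c.toNat : Int)
      = some (pvCase c) := by
  induction l generalizing d with
  | nil => cases hc
  | cons a l ih =>
    simp only [List.foldl_cons]
    by_cases hmem : c ∈ l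
    · exact ih _ hmem
    · have hca : c = a := by
        rcases List.mem_cons.mp hc with h | h
        · exact h
        · exact absurd h hmem
      subst hca
      rw [pvTable_lookup_aux _ _ _ (fun c' hc' hne => hmem (by
        have h2 : c'.toNat = c.toNat := by exact_mod_cast hne
        have : c' = c := Char.ext (UInt32.toNat_inj.mp h2)
        exact this ▸ hc'))]
      exact PySem.Dict.get?_insert_self _ _ _

theorem pvTable_getD (s : String) (c : Char) (hc : c ∈ s.toList) :
    (pvTable s).getD (c.toNat : Int) (String.ofList [c]) = pvCase c := by
  unfold pvTable
  have : c ∈ PySem.Set.ofList s.toList := by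
    rw [PySem.Set.mem_ofList]; exact hc
  simp [PySem.Dict.getD, pvTable_lookup _ _ _ this]

theorem foldl_case_append (l : List Char) (a : String) :
    l.foldl
      (fun s1 i =>
        if (i.toNat : Int) % 2 == 0 then s1 ++ PySem.Str.upper (String.ofList [i])
        else s1 ++ PySem.Str.lower (String.ofList [i])) a
      = a ++ String.join (l.map pvCase) := by
  have hfun : (fun (s1 : String) (i : Char) =>
      if (i.toNat : Int) % 2 == 0 then s1 ++ PySem.Str.upper (String.ofList [i])
      else s1 ++ PySem.Str.lower (String.ofList [i])) = (fun s1 i => s1 ++ pvCase i) := by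
    funext s1 i
    unfold pvCase
    split <;> rfl
  rw [hfun]
  induction l generalizing a with
  | nil => simp [String.join]
  | cons x l ih =>
    simp only [List.foldl_cons, List.map_cons]
    rw [ih, String.append_assoc]
    simp [String.join_eq, String.ofList_append]

theorem join_map_congr (s : String) (l : List Char) (hl : ∀ c ∈ l, c ∈ s.toList) :
    l.map (fun c => (pvTable s).getD (c.toNat : Int) (String.ofList [c])) = l.map pvCase := by
  apply List.map_congr_left
  intro c hc
  exact pvTable_getD s c (hl c hc)

-- ===== VERDICT (by name: the statement is the Claim_ definition above) =====
theorem ascii_capitalize_spec : Claim_equal_ascii_capitalize := by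
  intro s _
  unfold Spec_ascii_capitalize ascii_capitalize ascii_capitalize_alt
  rw [foldl_case_append, join_map_congr s s.toList (fun c hc => hc)]
  simp
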